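-- pv_equiv track=rewrite | github.com/fukuball/lyrics-match | p-library/lyrics_form_analysis/FormFinder.py | __interleaveCheck
-- ===== SOURCE A (Python) =====
-- def __interleaveCheck(family1, family2):
--
-- 	blockList = []
--
-- 	for block in family1:
-- 		blockList.append((1, block[0]))
--
--
-- 	for block in family2:
-- 		blockList.append((2, block[0]))
--
--
-- 	keyFunc = lambda pair: pair[1]
-- 	blockList = sorted(blockList, key = keyFunc)
--
--
-- 	kindChange = 0
--
-- 	"""
-- 	沒有overlap，並且計算兩種 block family 的交錯次數
-- 	"""
-- 	for i in range(len(blockList)  - 1):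
-- 		if blockList[i][0] != blockList[i + 1][0]:
-- 			kindChange += 1
--
--
-- 	#print "f1, ", family1
-- 	#print "f2, ", family2
-- 	#print "block list", blockList
-- 	#print "kind change", kindChange
-- 	#raw_input()
--
-- 	"""
-- 	若兩family有交錯，則 kindChange 必定會大於等於 3 次
-- 	"""
-- 	if kindChange >= 3:
-- 		return True
-- 	else:
-- 		return False
-- ===== SOURCE B (Python) =====
-- def __interleaveCheck(family1, family2):
--     pos1 = sorted(block[0] for block in family1)
--     pos2 = sorted(block[0] for block in family2)
--     i = j = 0
--     prev = None
--     changes = 0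
--     while i < len(pos1) or j < len(pos2):
--         if j >= len(pos2) or (i < len(pos1) and pos1[i] <= pos2[j]):
--             label = 1
--             i += 1
--         else:
--             label = 2
--             j += 1
--         if prev is not None and label != prev:
--             changes += 1
--         prev = label
--     return changes >= 3
-- ===== Notes on version B (the rewrite author's own statement) =====
-- stated objective: alternative
-- what changed: Instead of building one tagged (family, position) list, stably sorting it and then counting adjacent tag changes in an indexed pass, B sorts each family's start positions separately and walks the two sorted lists with a two-pointer merge (ties to family1, matching the stable sort) that counts label transitions on the fly; returns transitions >= 3.
import Mathlib
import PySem

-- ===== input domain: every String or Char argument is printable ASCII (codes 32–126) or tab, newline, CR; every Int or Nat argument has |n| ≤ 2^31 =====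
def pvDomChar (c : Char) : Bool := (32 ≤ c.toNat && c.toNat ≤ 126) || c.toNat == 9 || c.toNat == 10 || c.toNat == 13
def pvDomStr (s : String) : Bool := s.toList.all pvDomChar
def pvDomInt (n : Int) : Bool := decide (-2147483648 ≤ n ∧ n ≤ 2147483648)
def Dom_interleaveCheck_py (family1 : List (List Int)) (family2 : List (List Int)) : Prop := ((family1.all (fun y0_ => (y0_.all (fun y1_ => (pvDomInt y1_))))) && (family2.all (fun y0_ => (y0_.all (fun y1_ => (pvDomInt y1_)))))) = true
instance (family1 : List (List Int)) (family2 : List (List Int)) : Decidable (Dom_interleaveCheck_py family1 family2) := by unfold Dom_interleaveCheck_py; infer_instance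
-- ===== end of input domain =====

-- B replaces A's build-one-tagged-list-and-stable-sort by sorting each family's
-- positions separately and walking the two sorted lists with a two-pointer merge
-- that counts label transitions on the fly (objective: alternative decomposition).

-- ===== PORT A =====
-- literal transliteration of __interleaveCheck (Source A)
def interleaveCheck_py (family1 : List (List Int)) (family2 : List (List Int)) : Bool :=
  -- blockList = []; for block in family1: blockList.append((1, block[0]))
  let blockList : List (Int × Int) :=
    family1.foldl (fun acc block => acc ++ [((1 : Int), PySem.List.pyGetD block 0 0)]) []
  -- for block in family2: blockList.append((2, block[0]))
  let blockList :=
    family2.foldl (fun acc block => acc ++ [((2 : Int), PySem.List.pyGetD block 0 0)]) blockList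
  -- blockList = sorted(blockList, key = lambda pair: pair[1])
  let blockList := PySem.List.sorted blockList (fun pair => pair.2) false
  -- kindChange = 0; for i in range(len(blockList) - 1): …
  let kindChange : Int :=
    (PySem.List.pyRange 0 ((blockList.length : Int) - 1) 1).foldl
      (fun acc i =>
        if (PySem.List.pyGetD blockList i ((0 : Int), (0 : Int))).1 ≠
           (PySem.List.pyGetD blockList (i + 1) ((0 : Int), (0 : Int))).1
        then acc + 1 else acc) 0
  -- if kindChange >= 3: return True else: return False
  if kindChange ≥ 3 then true else false

-- ===== PORT B =====
-- the while loop of Source B: two-pointer merge over the two sorted position lists,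
-- counting label changes (label 1 = family1, 2 = family2; ties go to family1)
def mergeChanges : List Int → List Int → Option Int → Int → Int
  | [], [], _, changes => changes
  | x :: xs, [], prev, changes =>
      mergeChanges xs [] (some 1)
        (if prev ≠ none ∧ prev ≠ some 1 then changes + 1 else changes)
  | [], _ :: ys, prev, changes =>
      mergeChanges [] ys (some 2)
        (if prev ≠ none ∧ prev ≠ some 2 then changes + 1 else changes)
  | x :: xs, y :: ys, prev, changes =>
      if x ≤ y then
        mergeChanges xs (y :: ys) (some 1)
          (if prev ≠ none ∧ prev ≠ some 1 then changes + 1 else changes)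
      else
        mergeChanges (x :: xs) ys (some 2)
          (if prev ≠ none ∧ prev ≠ some 2 then changes + 1 else changes)
termination_by p1 p2 _ _ => p1.length + p2.length

-- literal transliteration of Source B's __interleaveCheck
def interleaveCheck_py_alt (family1 : List (List Int)) (family2 : List (List Int)) : Bool :=
  let pos1 := PySem.List.sorted (family1.map (fun block => PySem.List.pyGetD block 0 0)) (fun x => x) false
  let pos2 := PySem.List.sorted (family2.map (fun block => PySem.List.pyGetD block 0 0)) (fun x => x) false
  decide (mergeChanges pos1 pos2 none 0 ≥ 3)

-- ===== PRECONDITION & SPEC =====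
-- Pre_ excludes exactly the inputs on which Python A raises IndexError (a family
-- containing an empty block: block[0] fails); B raises there too.
def Pre_interleaveCheck_py (family1 : List (List Int)) (family2 : List (List Int)) : Prop :=
  (∀ b ∈ family1, b ≠ []) ∧ (∀ b ∈ family2, b ≠ [])
instance (family1 : List (List Int)) (family2 : List (List Int)) : Decidable (Pre_interleaveCheck_py family1 family2) := by unfold Pre_interleaveCheck_py; infer_instance

def pvWitness_interleaveCheck_py : List (List Int) × List (List Int) :=
  ([[1], [5]], [[3], [7]])

def Spec_interleaveCheck_py (family1 : List (List Int)) (family2 : List (List Int)) (out : Bool) : Prop := out = interleaveCheck_py_alt family1 family2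
instance (family1 : List (List Int)) (family2 : List (List Int)) (out : Bool) : Decidable (Spec_interleaveCheck_py family1 family2 out) := by unfold Spec_interleaveCheck_py; infer_instance

-- ===== CLAIM (what is proved, stated in full; the proofs are below) =====
def Claim_equal_interleaveCheck_py : Prop := ∀ (family1 : List (List Int)) (family2 : List (List Int)), Dom_interleaveCheck_py family1 family2 → Pre_interleaveCheck_py family1 family2 → Spec_interleaveCheck_py family1 family2 (interleaveCheck_py family1 family2)

-- ===== LEMMAS AND PROOFS =====

-- lexicographic key (position, then tag): the order A's stable sort realises
def keyL (p : Int × Int) : Lex (Int × Int) := toLex (p.2, p.1)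

theorem keyL_injective : Function.Injective keyL := by
  intro a b h
  have := congrArg ofLex h
  simp [keyL] at this
  exact Prod.ext this.2 this.1

-- proof-side twin of mergeChanges that records the tagged merged sequence
def mergeTag : List Int → List Int → List (Int × Int)
  | [], [] => []
  | x :: xs, [] => (1, x) :: mergeTag xs []
  | [], y :: ys => (2, y) :: mergeTag [] ys
  | x :: xs, y :: ys =>
      if x ≤ y then (1, x) :: mergeTag xs (y :: ys)
      else (2, y) :: mergeTag (x :: xs) ys
termination_by p1 p2 => p1.length + p2.length

-- transition counter over a tagged list, seeded with a previous label
def transFrom (prev : Option Int) : List (Int × Int) → Int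
  | [] => 0
  | a :: t => (if prev ≠ none ∧ prev ≠ some a.1 then 1 else 0) + transFrom (some a.1) t

theorem mergeChanges_eq_transFrom (p1 p2 : List Int) (prev : Option Int) (c : Int) :
    mergeChanges p1 p2 prev c = c + transFrom prev (mergeTag p1 p2) := by
  fun_induction mergeTag p1 p2 generalizing prev c with
  | case1 => simp [mergeChanges, transFrom]
  | case2 x xs ih =>
      simp only [mergeChanges, transFrom, ih]
      split_ifs <;> ring
  | case3 y ys ih =>
      simp only [mergeChanges, transFrom, ih]
      split_ifs <;> ring
  | case4 x xs y ys hxy ih =>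
      simp only [mergeChanges, transFrom, ih, if_pos hxy]
      split_ifs <;> ring
  | case5 x xs y ys hxy ih =>
      simp only [mergeChanges, transFrom, ih, if_neg hxy]
      split_ifs <;> ring

theorem mergeTag_perm (p1 p2 : List Int) :
    (mergeTag p1 p2).Perm (p1.map (fun x => ((1 : Int), x)) ++ p2.map (fun y => ((2 : Int), y))) := by
  fun_induction mergeTag p1 p2 with
  | case1 => simp
  | case2 x xs ih => simpa using ih.cons ((1:Int), x)
  | case3 y ys ih => simpa using ih.cons ((2:Int), y)
  | case4 x xs y ys hxy ih => simpa using ih.cons ((1:Int), x)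
  | case5 x xs y ys hxy ih =>
      simp only [List.map_cons]
      exact (ih.cons ((2:Int), y)).trans List.perm_middle.symm

theorem mem_mergeTag {p1 p2 : List Int} {e : Int × Int} (h : e ∈ mergeTag p1 p2) :
    (e.1 = 1 ∧ e.2 ∈ p1) ∨ (e.1 = 2 ∧ e.2 ∈ p2) := by
  have := (mergeTag_perm p1 p2).mem_iff.mp h
  rcases List.mem_append.mp this with h1 | h2
  · rcases List.mem_map.mp h1 with ⟨x, hx, he⟩
    exact Or.inl (by cases he; exact ⟨rfl, hx⟩)
  · rcases List.mem_map.mp h2 with ⟨y, hy, he⟩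
    exact Or.inr (by cases he; exact ⟨rfl, hy⟩)

theorem mergeTag_pairwise {p1 p2 : List Int}
    (h1 : p1.Pairwise (· ≤ ·)) (h2 : p2.Pairwise (· ≤ ·)) :
    (mergeTag p1 p2).Pairwise (fun a b => keyL a ≤ keyL b) := by
  fun_induction mergeTag p1 p2 with
  | case1 => simp
  | case2 x xs ih =>
      rcases List.pairwise_cons.mp h1 with ⟨hx, hxs⟩
      refine List.pairwise_cons.mpr ⟨?_, ih hxs h2⟩
      intro e he
      rcases mem_mergeTag he with ⟨_, hm⟩ | ⟨_, hm⟩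
      · have := hx _ hm
        simp [keyL, Prod.Lex.le_iff]; omega
      · simp at hm
  | case3 y ys ih =>
      rcases List.pairwise_cons.mp h2 with ⟨hy, hys⟩
      refine List.pairwise_cons.mpr ⟨?_, ih h1 hys⟩
      intro e he
      rcases mem_mergeTag he with ⟨_, hm⟩ | ⟨_, hm⟩
      · simp at hm
      · have := hy _ hm
        simp [keyL, Prod.Lex.le_iff]; omega
  | case4 x xs y ys hxy ih =>
      rcases List.pairwise_cons.mp h1 with ⟨hx, hxs⟩
      refine List.pairwise_cons.mpr ⟨?_, ih hxs h2⟩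
      intro e he
      rcases mem_mergeTag he with ⟨ht, hm⟩ | ⟨ht, hm⟩
      · have := hx _ hm
        simp [keyL, Prod.Lex.le_iff]; omega
      · rcases List.pairwise_cons.mp h2 with ⟨hy, _⟩
        have : y ≤ e.2 := by
          rcases List.mem_cons.mp hm with rfl | hm'
          · exact le_refl _
          · exact hy _ hm'
        simp [keyL, Prod.Lex.le_iff]; omega
  | case5 x xs y ys hxy ih =>
      rcases List.pairwise_cons.mp h2 with ⟨hy, hys⟩
      refine List.pairwise_cons.mpr ⟨?_, ih h1 hys⟩
      intro e he
      rcases mem_mergeTag he with ⟨ht, hm⟩ | ⟨ht, hm⟩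
      · rcases List.pairwise_cons.mp h1 with ⟨hx, _⟩
        have : x ≤ e.2 := by
          rcases List.mem_cons.mp hm with rfl | hm'
          · exact le_refl _
          · exact hx _ hm'
        simp [keyL, Prod.Lex.le_iff]; omega
      · have := hy _ hm
        simp [keyL, Prod.Lex.le_iff]; omega

-- inserting a tag-2 element into a keyL-sorted list of tags ≤ 2 keeps it keyL-sorted
theorem insertBy_tag2_pairwise (p : Int) :
    ∀ acc : List (Int × Int), acc.Pairwise (fun a b => keyL a ≤ keyL b) →
      (∀ e ∈ acc, e.1 ≤ 2) →
      (PySem.List.insertBy (fun a b => decide (a.2 < b.2)) ((2 : Int), p) acc).Pairwise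
        (fun a b => keyL a ≤ keyL b)
  | [], _, _ => by simp [PySem.List.insertBy]
  | h :: t, hp, htag => by
      rcases List.pairwise_cons.mp hp with ⟨hh, ht⟩
      by_cases hc : p < h.2
      · simp only [PySem.List.insertBy, hc, decide_true, if_true]
        refine List.pairwise_cons.mpr ⟨?_, hp⟩
        intro e he
        rcases List.mem_cons.mp he with rfl | he'
        · simp [keyL, Prod.Lex.le_iff]; omega
        · have := hh _ he'
          have : h.2 ≤ e.2 := by
            have h2 := hh _ he'
            simp [keyL, Prod.Lex.le_iff] at h2; omega
          simp [keyL, Prod.Lex.le_iff]; omega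
      · simp only [PySem.List.insertBy, hc, decide_false]
        refine List.pairwise_cons.mpr ⟨?_, insertBy_tag2_pairwise p t ht
          (fun e he => htag e (List.mem_cons_of_mem _ he))⟩
        intro e he
        rcases (PySem.List.mem_insertBy _ _ _ _).mp he with rfl | he'
        · have := htag h (List.mem_cons_self)
          simp [keyL, Prod.Lex.le_iff]; omega
        · exact hh _ he'

theorem foldl_insert_tag2_pairwise (l2 : List Int) :
    ∀ acc : List (Int × Int), acc.Pairwise (fun a b => keyL a ≤ keyL b) →
      (∀ e ∈ acc, e.1 ≤ 2) →
      (l2.foldl (fun acc x =>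
          PySem.List.insertBy (fun a b => decide (a.2 < b.2)) ((2 : Int), x) acc) acc).Pairwise
        (fun a b => keyL a ≤ keyL b) := by
  induction l2 with
  | nil => intro acc hp _; simpa using hp
  | cons y ys ih =>
      intro acc hp htag
      simp only [List.foldl_cons]
      refine ih _ (insertBy_tag2_pairwise y acc hp htag) ?_
      intro e he
      rcases (PySem.List.mem_insertBy _ _ _ _).mp he with rfl | he'
      · norm_num
      · exact htag e he'

-- A's sorted tagged list is keyL-sorted (stability: family1 before family2 at equal positions)
theorem sorted_tagged_pairwise (l1 l2 : List Int) :
    (PySem.List.sorted (l1.map (fun x => ((1 : Int), x)) ++ l2.map (fun y => ((2 : Int), y)))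
        (fun pair => pair.2) false).Pairwise (fun a b => keyL a ≤ keyL b) := by
  rw [PySem.List.sorted_eq_foldl_insertBy, List.foldl_append, List.foldl_map,
    ← PySem.List.sorted_eq_foldl_insertBy (l1.map (fun x => ((1 : Int), x)))
      (fun pair : Int × Int => pair.2)]
  refine foldl_insert_tag2_pairwise l2 _ ?_ ?_
  · have hp := PySem.List.sorted_pairwise (l1.map (fun x => ((1 : Int), x)))
      (fun pair : Int × Int => pair.2)
    refine hp.imp_of_mem ?_
    intro a b ha hb hle
    have ha1 : a.1 = 1 := by
      rcases List.mem_map.mp ((PySem.List.mem_sorted _ _ _ _).mp ha) with ⟨x, _, rfl⟩; rfl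
    have hb1 : b.1 = 1 := by
      rcases List.mem_map.mp ((PySem.List.mem_sorted _ _ _ _).mp hb) with ⟨x, _, rfl⟩; rfl
    simp only at hle
    simp [keyL, Prod.Lex.le_iff]; omega
  · intro e he
    rcases List.mem_map.mp ((PySem.List.mem_sorted _ _ _ _).mp he) with ⟨x, _, rfl⟩
    norm_num

-- the central identity: A's stably sorted tagged list IS B's two-pointer merge
theorem sorted_tagged_eq_mergeTag (l1 l2 : List Int) :
    PySem.List.sorted (l1.map (fun x => ((1 : Int), x)) ++ l2.map (fun y => ((2 : Int), y)))
        (fun pair => pair.2) false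
      = mergeTag (PySem.List.sorted l1 (fun x => x) false)
                 (PySem.List.sorted l2 (fun x => x) false) := by
  refine PySem.List.eq_of_perm_of_pairwise_le_of_injective keyL keyL_injective ?_
      (sorted_tagged_pairwise l1 l2)
      (mergeTag_pairwise (PySem.List.sorted_pairwise l1 (fun x => x))
        (PySem.List.sorted_pairwise l2 (fun x => x)))
  refine (PySem.List.sorted_perm _ _ _).trans ?_
  refine ((mergeTag_perm _ _).trans ?_).symm
  exact List.Perm.append
    ((PySem.List.sorted_perm l1 (fun x => x) false).map _)
    ((PySem.List.sorted_perm l2 (fun x => x) false).map _)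

-- A's indexed adjacent-difference loop equals transFrom, Nat-indexed core
theorem foldl_range_count_eq_transFrom (M : List (Int × Int)) :
    ∀ (a : Int × Int) (c : Int),
      (List.range M.length).foldl
        (fun acc k =>
          if ((a :: M).getD k ((0 : Int), (0 : Int))).1 ≠
             ((a :: M).getD (k + 1) ((0 : Int), (0 : Int))).1
          then acc + 1 else acc) c = c + transFrom (some a.1) M := by
  induction M with
  | nil => intro a c; simp [transFrom]
  | cons b t ih =>
      intro a c
      rw [List.length_cons, List.range_succ_eq_map, List.foldl_cons, List.foldl_map]
      have hfun : (fun (acc : Int) (k : Nat) =>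
            if ((a :: b :: t).getD (k + 1) ((0 : Int), (0 : Int))).1 ≠
               ((a :: b :: t).getD (k + 1 + 1) ((0 : Int), (0 : Int))).1
            then acc + 1 else acc)
          = (fun (acc : Int) (k : Nat) =>
            if ((b :: t).getD k ((0 : Int), (0 : Int))).1 ≠
               ((b :: t).getD (k + 1) ((0 : Int), (0 : Int))).1
            then acc + 1 else acc) := by
        funext acc k
        simp
      simp only [Nat.succ_eq_add_one, hfun]
      rw [ih b]
      simp only [List.getD_cons_zero, List.getD_cons_succ, transFrom]
      by_cases hab : a.1 = b.1
      · simp [hab]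
      · simp [hab]; ring

theorem countLoop_eq_transFrom (L : List (Int × Int)) :
    (PySem.List.pyRange 0 ((L.length : Int) - 1) 1).foldl
      (fun acc i =>
        if (PySem.List.pyGetD L i ((0 : Int), (0 : Int))).1 ≠
           (PySem.List.pyGetD L (i + 1) ((0 : Int), (0 : Int))).1
        then acc + 1 else acc) 0 = transFrom none L := by
  cases L with
  | nil => decide
  | cons a M =>
      have hlen : ((a :: M).length : Int) - 1 = (M.length : Int) := by
        simp
      rw [hlen, PySem.List.pyRange_one, List.foldl_map]
      have hfun : (fun (acc : Int) (k : Nat) =>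
            if (PySem.List.pyGetD (a :: M) (0 + (k : Int)) ((0 : Int), (0 : Int))).1 ≠
               (PySem.List.pyGetD (a :: M) (0 + (k : Int) + 1) ((0 : Int), (0 : Int))).1
            then acc + 1 else acc)
          = (fun (acc : Int) (k : Nat) =>
            if ((a :: M).getD k ((0 : Int), (0 : Int))).1 ≠
               ((a :: M).getD (k + 1) ((0 : Int), (0 : Int))).1
            then acc + 1 else acc) := by
        funext acc k
        have h1 : (0 : Int) + (k : Int) = ((k : Nat) : Int) := by push_cast; ring
        have h2 : ((k : Nat) : Int) + 1 = ((k + 1 : Nat) : Int) := by exact_mod_cast rfl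
        rw [h1, h2, PySem.List.pyGetD_natCast, PySem.List.pyGetD_natCast]
      simp only [Int.sub_zero, Int.toNat_natCast, hfun]
      rw [foldl_range_count_eq_transFrom M a 0]
      simp [transFrom]

-- final bridge on B's side
theorem alt_eq (family1 family2 : List (List Int)) :
    interleaveCheck_py_alt family1 family2 =
      decide (transFrom none (mergeTag
        (PySem.List.sorted (family1.map (fun b => PySem.List.pyGetD b 0 0)) (fun x => x) false)
        (PySem.List.sorted (family2.map (fun b => PySem.List.pyGetD b 0 0)) (fun x => x) false)) ≥ 3) := by
  simp only [interleaveCheck_py_alt, mergeChanges_eq_transFrom, zero_add]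

-- ===== VERDICT (by name: the statement is the Claim_ definition above) =====
theorem interleaveCheck_py_spec : Claim_equal_interleaveCheck_py := by
  intro family1 family2 _ _
  unfold Spec_interleaveCheck_py
  unfold interleaveCheck_py
  simp only [PySem.List.foldl_append_singleton_eq_map, List.nil_append]
  have h1 : List.map (fun block => ((1:Int), PySem.List.pyGetD block 0 0)) family1
      = List.map (fun x => ((1:Int), x)) (family1.map (fun b => PySem.List.pyGetD b 0 0)) := by
    simp [List.map_map, Function.comp]
  have h2 : List.map (fun block => ((2:Int), PySem.List.pyGetD block 0 0)) family2
      = List.map (fun x => ((2:Int), x)) (family2.map (fun b => PySem.List.pyGetD b 0 0)) := by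
    simp [List.map_map, Function.comp]
  rw [h1, h2, sorted_tagged_eq_mergeTag, countLoop_eq_transFrom, alt_eq]
  split_ifs with h
  · simp [h]
  · simp [h]
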